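-- pv_equiv track=rewrite | github.com/rackjoobee/smartversion | smartversion/tuple_smartversion.py | first_int
-- ===== SOURCE A (Python) =====
-- import string
--
-- def first_int(s):
--     """Return the first integer in a string, or None"""
--     # This technique appears to be faster than the re-based method
--     # by almost an order of magnitude. Prefer it
--     ret = ''
--     for c in s:
--         if c in string.digits:
--             ret += c
--         else:
--             break
--     if len(ret) > 0:
--         return int(ret)
--     else:
--         return None
-- ===== SOURCE B (Python) =====
-- import re
--
-- def first_int(s):
--     """Return the first integer in a string, or None"""
--     m = re.match(r'[0-9]+', s)
--     return int(m.group()) if m else None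
-- ===== Notes on version B (the rewrite author's own statement) =====
-- stated objective: idiomatic
-- what changed: Replaced the explicit per-character loop with string accumulation by a single re.match(r'[0-9]+') that delegates the leading-digit scan to the regex engine.
import Mathlib
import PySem

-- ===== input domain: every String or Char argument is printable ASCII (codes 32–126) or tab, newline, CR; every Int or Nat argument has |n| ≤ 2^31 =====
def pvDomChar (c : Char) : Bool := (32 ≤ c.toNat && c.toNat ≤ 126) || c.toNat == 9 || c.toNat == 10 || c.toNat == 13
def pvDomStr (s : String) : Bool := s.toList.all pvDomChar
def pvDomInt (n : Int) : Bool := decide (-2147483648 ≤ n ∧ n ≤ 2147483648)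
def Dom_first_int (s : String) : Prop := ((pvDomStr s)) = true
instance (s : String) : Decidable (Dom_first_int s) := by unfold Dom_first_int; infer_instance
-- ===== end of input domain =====

-- B delegates the leading-digit scan to the regex engine (re.match r'[0-9]+') instead of an
-- explicit per-character loop with string accumulation; idiomatic, same exact behaviour.

-- ===== PORT A =====
-- string.digits
def pvStrDigits : List Char := "0123456789".toList

-- A's for-loop: append each digit character to ret, break at the first non-digit
def firstIntGo : List Char → List Char → List Char
  | [], ret => ret
  | c :: cs, ret => if pvStrDigits.contains c then firstIntGo cs (ret ++ [c]) else ret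

def first_int (s : String) : Option Int :=
  let ret := firstIntGo s.toList []
  if ret.length > 0 then PySem.Int.ofChars? ret else none

-- ===== PORT B =====
-- re.match(r'[0-9]+', s) = the maximal leading run of ASCII digit characters;
-- if the match is non-empty return int(m.group()), else None
def first_int_alt (s : String) : Option Int :=
  let t := s.toList.takeWhile (fun c => '0' ≤ c && c ≤ '9')
  if t.isEmpty then none else PySem.Int.ofChars? t

-- ===== PRECONDITION & SPEC =====
def Spec_first_int (s : String) (out : Option Int) : Prop := out = first_int_alt s
instance (s : String) (out : Option Int) : Decidable (Spec_first_int s out) := by unfold Spec_first_int; infer_instance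

-- ===== CLAIM (what is proved, stated in full; the proofs are below) =====
def Claim_equal_first_int : Prop := ∀ (s : String), Dom_first_int s → Spec_first_int s (first_int s)

-- ===== LEMMAS AND PROOFS =====
theorem digits_list : pvStrDigits = ['0','1','2','3','4','5','6','7','8','9'] := by decide

theorem le0 (c : Char) : ('0' ≤ c) ↔ 48 ≤ c.toNat := by
  rw [Char.le_def, UInt32.le_iff_toNat_le]; exact Iff.rfl

theorem le9 (c : Char) : (c ≤ '9') ↔ c.toNat ≤ 57 := by
  rw [Char.le_def, UInt32.le_iff_toNat_le]; exact Iff.rfl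

-- A's membership test `c in string.digits` agrees with B's regex character class [0-9]
theorem digit_pred (c : Char) : pvStrDigits.contains c = ('0' ≤ c && c ≤ '9') := by
  rw [digits_list]
  by_cases h : 48 ≤ c.toNat ∧ c.toNat ≤ 57
  · obtain ⟨h1, h2⟩ := h
    have hc : c = Char.ofNat c.toNat := (Char.ofNat_toNat c).symm
    interval_cases hn : c.toNat <;> rw [hc] <;> decide
  · have hb : ('0' ≤ c && c ≤ '9') = false := by
      rcases not_and_or.mp h with h' | h'
      · simp [le0, h']
      · simp [le9, h']
    rw [hb]
    simp only [List.contains_cons, List.contains_nil, Bool.or_false]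
    by_contra hcon
    simp only [Bool.not_eq_false, Bool.or_eq_true, beq_iff_eq] at hcon
    rcases hcon with h'|h'|h'|h'|h'|h'|h'|h'|h'|h' <;> subst h' <;> exact h (by decide)

-- A's accumulating loop computes the leading digit run (B's regex match)
theorem firstIntGo_eq (cs acc : List Char) :
    firstIntGo cs acc = acc ++ cs.takeWhile (fun c => '0' ≤ c && c ≤ '9') := by
  induction cs generalizing acc with
  | nil => simp [firstIntGo]
  | cons c cs ih =>
    simp only [firstIntGo, digit_pred, List.takeWhile]
    by_cases h : ('0' ≤ c && c ≤ '9') = true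
    · simp [h, ih]
    · simp [h]

-- ===== VERDICT (by name: the statement is the Claim_ definition above) =====
theorem first_int_spec : Claim_equal_first_int := by
  intro s _
  unfold Spec_first_int first_int first_int_alt
  simp only [firstIntGo_eq, List.nil_append]
  rcases h : s.toList.takeWhile (fun c => '0' ≤ c && c ≤ '9') with _ | ⟨c, cs⟩ <;> simp
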